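-- pv_equiv track=rewrite | github.com/SungChanl/Base-Training | python/daily_Quiz/Day8_Quiz.py | solution
-- ===== SOURCE A (Python) =====
-- def solution(a, b, c, d):
--     answer = 0
--     result1 = [a, b, c, d]
--     result = set(result1)
--
--     if len(result) == 1:
--         answer = 1111 * a
--
--     elif len(result) == 2:
--         if a == b and b == c:
--             answer = (10 * a + d) ** 2
--         elif a == b and b == d:
--             answer = (10 * a + c) ** 2
--         elif a == c and c == d:
--             answer = (10 * a + b) ** 2
--         elif b == c and c == d:
--             answer = (10 * b + a) ** 2
--         elif a == b and c == d:
--             if a > c: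
--                 answer = (a + c) * (a - c)
--             else:
--                 answer = (a + c) * (c - a)
--         elif a == c and b == d:
--             if a > b:
--                 answer = (a + b) * (a - b)
--             else:
--                 answer = (a + b) * (b - a)
--         elif a == d and c == b:
--             if a > c:
--                 answer = (a + c) * (a - c)
--             else:
--                 answer = (a + c) * (c - a)
--
--     elif len(result) == 3:
--         if a == b:
--             answer = c * d
--         elif a == c:
--             answer = b * d
--         elif a == d:
--             answer = b * c
--         elif b == c:
--             answer = a * d
--         elif b == d:
--             answer = a * c
--         elif c == d:
--             answer = a * b
--
--     elif len(result) == 4: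
--         answer = 7
--         for i in result1:
--             if i < answer:
--                 answer = i
--
--     return answer
-- ===== SOURCE B (Python) =====
-- def solution(a, b, c, d):
--     cnt = {}
--     for v in (a, b, c, d):
--         cnt[v] = cnt.get(v, 0) + 1
--     counts = sorted(cnt.values())
--     if counts == [4]:
--         return 1111 * a
--     if counts == [1, 3]:
--         triple = [v for v, n in cnt.items() if n == 3][0]
--         single = [v for v, n in cnt.items() if n == 1][0]
--         return (10 * triple + single) ** 2
--     if counts == [2, 2]:
--         x, y = cnt
--         return (x + y) * abs(x - y)
--     if counts == [1, 1, 2]: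
--         s = [v for v, n in cnt.items() if n == 1]
--         return s[0] * s[1]
--     return min(7, a, b, c, d)
-- ===== Notes on version B (the rewrite author's own statement) =====
-- stated objective: simpler
-- what changed: Replaced A's cascade of explicit pairwise-equality branches (13 if-arms plus a final min loop) by a frequency table built in one pass over the four values and a dispatch on the sorted list of counts ([4], [1,3], [2,2], [1,1,2], else), with abs replacing A's sign-case split.
import Mathlib
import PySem

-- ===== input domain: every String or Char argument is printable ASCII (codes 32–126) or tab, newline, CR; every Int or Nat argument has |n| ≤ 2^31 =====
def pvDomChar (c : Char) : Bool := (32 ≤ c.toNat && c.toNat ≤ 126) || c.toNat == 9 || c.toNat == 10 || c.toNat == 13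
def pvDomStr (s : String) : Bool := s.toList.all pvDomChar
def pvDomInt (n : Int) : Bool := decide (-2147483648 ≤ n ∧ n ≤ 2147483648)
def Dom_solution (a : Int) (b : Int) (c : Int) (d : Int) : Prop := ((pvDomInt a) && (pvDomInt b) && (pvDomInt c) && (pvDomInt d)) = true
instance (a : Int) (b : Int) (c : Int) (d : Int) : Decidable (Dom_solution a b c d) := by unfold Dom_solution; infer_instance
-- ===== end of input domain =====

-- B replaces A's cascade of pairwise-equality branches by a frequency table (dict of counts)
-- dispatched on the sorted count multiset; objective: simpler. Exact equivalence proved on Dom.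


-- ===== PORT A =====
def solution (a : Int) (b : Int) (c : Int) (d : Int) : Int :=
  let result1 : List Int := [a, b, c, d]
  let result : PySem.Set Int := PySem.Set.ofList result1
  if result.length = 1 then 1111 * a
  else if result.length = 2 then
    if a = b ∧ b = c then (10 * a + d) ^ 2
    else if a = b ∧ b = d then (10 * a + c) ^ 2
    else if a = c ∧ c = d then (10 * a + b) ^ 2
    else if b = c ∧ c = d then (10 * b + a) ^ 2
    else if a = b ∧ c = d then (if a > c then (a + c) * (a - c) else (a + c) * (c - a))
    else if a = c ∧ b = d then (if a > b then (a + b) * (a - b) else (a + b) * (b - a))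
    else if a = d ∧ c = b then (if a > c then (a + c) * (a - c) else (a + c) * (c - a))
    else 0
  else if result.length = 3 then
    if a = b then c * d
    else if a = c then b * d
    else if a = d then b * c
    else if b = c then a * d
    else if b = d then a * c
    else if c = d then a * b
    else 0
  else if result.length = 4 then
    result1.foldl (fun ans i => if i < ans then i else ans) 7
  else 0

-- ===== PORT B =====
def solution_alt (a : Int) (b : Int) (c : Int) (d : Int) : Int :=
  let cnt : PySem.Dict Int Int :=
    [a, b, c, d].foldl (fun m v => m.insert v (m.getD v 0 + 1)) PySem.Dict.empty
  let counts := PySem.List.sorted (PySem.Dict.values cnt) (fun x => x) false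
  if counts = [4] then 1111 * a
  else if counts = [1, 3] then
    let triple := (((PySem.Dict.items cnt).filter (fun p => p.2 = 3)).map Prod.fst).headI
    let single := (((PySem.Dict.items cnt).filter (fun p => p.2 = 1)).map Prod.fst).headI
    (10 * triple + single) ^ 2
  else if counts = [2, 2] then
    match PySem.Dict.keys cnt with
    | [x, y] => (x + y) * |x - y|
    | _ => 0
  else if counts = [1, 1, 2] then
    let s := (((PySem.Dict.items cnt).filter (fun p => p.2 = 1)).map Prod.fst)
    s.headI * s.tail.headI
  else
    min 7 (min a (min b (min c d)))

-- ===== PRECONDITION & SPEC =====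
def Spec_solution (a : Int) (b : Int) (c : Int) (d : Int) (out : Int) : Prop := out = solution_alt a b c d
instance (a : Int) (b : Int) (c : Int) (d : Int) (out : Int) : Decidable (Spec_solution a b c d out) := by unfold Spec_solution; infer_instance

-- ===== CLAIM (what is proved, stated in full; the proofs are below) =====
def Claim_equal_solution : Prop := ∀ (a : Int) (b : Int) (c : Int) (d : Int), Dom_solution a b c d → Spec_solution a b c d (solution a b c d)

-- ===== LEMMAS AND PROOFS =====

lemma Lall (x : Int)  : solution x x x x = solution_alt x x x x := by
  simp [solution, solution_alt, PySem.Set.ofList, PySem.Set.add, PySem.Set.empty, PySem.Dict.insert,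
      PySem.Dict.empty, PySem.Dict.getD, PySem.Dict.get?, PySem.Dict.contains,
      PySem.Dict.values, PySem.Dict.keys, PySem.List.sorted, PySem.List.insertBy,
      List.foldl, Ne.symm]

lemma Ltrip1 (x y : Int) (h0 : x ≠ y) : solution x x x y = solution_alt x x x y := by
  simp [solution, solution_alt, PySem.Set.ofList, PySem.Set.add, PySem.Set.empty, PySem.Dict.insert,
      PySem.Dict.empty, PySem.Dict.getD, PySem.Dict.get?, PySem.Dict.contains,
      PySem.Dict.values, PySem.Dict.keys, PySem.List.sorted, PySem.List.insertBy,
      List.foldl, h0, Ne.symm]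

lemma Ltrip2 (x y : Int) (h0 : x ≠ y) : solution x x y x = solution_alt x x y x := by
  simp [solution, solution_alt, PySem.Set.ofList, PySem.Set.add, PySem.Set.empty, PySem.Dict.insert,
      PySem.Dict.empty, PySem.Dict.getD, PySem.Dict.get?, PySem.Dict.contains,
      PySem.Dict.values, PySem.Dict.keys, PySem.List.sorted, PySem.List.insertBy,
      List.foldl, h0, Ne.symm]

lemma Ltrip3 (x y : Int) (h0 : x ≠ y) : solution x y x x = solution_alt x y x x := by
  simp [solution, solution_alt, PySem.Set.ofList, PySem.Set.add, PySem.Set.empty, PySem.Dict.insert,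
      PySem.Dict.empty, PySem.Dict.getD, PySem.Dict.get?, PySem.Dict.contains,
      PySem.Dict.values, PySem.Dict.keys, PySem.List.sorted, PySem.List.insertBy,
      List.foldl, h0, Ne.symm]

lemma Ltrip4 (x y : Int) (h0 : x ≠ y) : solution y x x x = solution_alt y x x x := by
  simp [solution, solution_alt, PySem.Set.ofList, PySem.Set.add, PySem.Set.empty, PySem.Dict.insert,
      PySem.Dict.empty, PySem.Dict.getD, PySem.Dict.get?, PySem.Dict.contains,
      PySem.Dict.values, PySem.Dict.keys, PySem.List.sorted, PySem.List.insertBy,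
      List.foldl, h0, Ne.symm]

lemma Lpp1 (x y : Int) (h0 : x ≠ y) : solution x x y y = solution_alt x x y y := by
  simp [solution, solution_alt, PySem.Set.ofList, PySem.Set.add, PySem.Set.empty, PySem.Dict.insert,
      PySem.Dict.empty, PySem.Dict.getD, PySem.Dict.get?, PySem.Dict.contains,
      PySem.Dict.values, PySem.Dict.keys, PySem.List.sorted, PySem.List.insertBy,
      List.foldl, h0, Ne.symm]
  (try (rcases abs_cases (x - y) with ⟨h1,h2⟩|⟨h1,h2⟩ <;> rw [h1] <;> split_ifs <;> (try ring) <;> (exfalso; omega)))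

lemma Lpp2 (x y : Int) (h0 : x ≠ y) : solution x y x y = solution_alt x y x y := by
  simp [solution, solution_alt, PySem.Set.ofList, PySem.Set.add, PySem.Set.empty, PySem.Dict.insert,
      PySem.Dict.empty, PySem.Dict.getD, PySem.Dict.get?, PySem.Dict.contains,
      PySem.Dict.values, PySem.Dict.keys, PySem.List.sorted, PySem.List.insertBy,
      List.foldl, h0, Ne.symm]
  (try (rcases abs_cases (x - y) with ⟨h1,h2⟩|⟨h1,h2⟩ <;> rw [h1] <;> split_ifs <;> (try ring) <;> (exfalso; omega)))

lemma Lpp3 (x y : Int) (h0 : x ≠ y) : solution x y y x = solution_alt x y y x := by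
  simp [solution, solution_alt, PySem.Set.ofList, PySem.Set.add, PySem.Set.empty, PySem.Dict.insert,
      PySem.Dict.empty, PySem.Dict.getD, PySem.Dict.get?, PySem.Dict.contains,
      PySem.Dict.values, PySem.Dict.keys, PySem.List.sorted, PySem.List.insertBy,
      List.foldl, h0, Ne.symm]
  (try (rcases abs_cases (x - y) with ⟨h1,h2⟩|⟨h1,h2⟩ <;> rw [h1] <;> split_ifs <;> (try ring) <;> (exfalso; omega)))

lemma Lp12 (x y z : Int) (h0 : x ≠ y) (h1 : x ≠ z) (h2 : y ≠ z) : solution x x y z = solution_alt x x y z := by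
  simp [solution, solution_alt, PySem.Set.ofList, PySem.Set.add, PySem.Set.empty, PySem.Dict.insert,
      PySem.Dict.empty, PySem.Dict.getD, PySem.Dict.get?, PySem.Dict.contains,
      PySem.Dict.values, PySem.Dict.keys, PySem.List.sorted, PySem.List.insertBy,
      List.foldl, h0, h1, h2, Ne.symm]

lemma Lp13 (x y z : Int) (h0 : x ≠ y) (h1 : x ≠ z) (h2 : y ≠ z) : solution x y x z = solution_alt x y x z := by
  simp [solution, solution_alt, PySem.Set.ofList, PySem.Set.add, PySem.Set.empty, PySem.Dict.insert,
      PySem.Dict.empty, PySem.Dict.getD, PySem.Dict.get?, PySem.Dict.contains,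
      PySem.Dict.values, PySem.Dict.keys, PySem.List.sorted, PySem.List.insertBy,
      List.foldl, h0, h1, h2, Ne.symm]

lemma Lp14 (x y z : Int) (h0 : x ≠ y) (h1 : x ≠ z) (h2 : y ≠ z) : solution x y z x = solution_alt x y z x := by
  simp [solution, solution_alt, PySem.Set.ofList, PySem.Set.add, PySem.Set.empty, PySem.Dict.insert,
      PySem.Dict.empty, PySem.Dict.getD, PySem.Dict.get?, PySem.Dict.contains,
      PySem.Dict.values, PySem.Dict.keys, PySem.List.sorted, PySem.List.insertBy,
      List.foldl, h0, h1, h2, Ne.symm]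

lemma Lp23 (x y z : Int) (h0 : x ≠ y) (h1 : x ≠ z) (h2 : y ≠ z) : solution y x x z = solution_alt y x x z := by
  simp [solution, solution_alt, PySem.Set.ofList, PySem.Set.add, PySem.Set.empty, PySem.Dict.insert,
      PySem.Dict.empty, PySem.Dict.getD, PySem.Dict.get?, PySem.Dict.contains,
      PySem.Dict.values, PySem.Dict.keys, PySem.List.sorted, PySem.List.insertBy,
      List.foldl, h0, h1, h2, Ne.symm]

lemma Lp24 (x y z : Int) (h0 : x ≠ y) (h1 : x ≠ z) (h2 : y ≠ z) : solution y x z x = solution_alt y x z x := by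
  simp [solution, solution_alt, PySem.Set.ofList, PySem.Set.add, PySem.Set.empty, PySem.Dict.insert,
      PySem.Dict.empty, PySem.Dict.getD, PySem.Dict.get?, PySem.Dict.contains,
      PySem.Dict.values, PySem.Dict.keys, PySem.List.sorted, PySem.List.insertBy,
      List.foldl, h0, h1, h2, Ne.symm]

lemma Lp34 (x y z : Int) (h0 : x ≠ y) (h1 : x ≠ z) (h2 : y ≠ z) : solution y z x x = solution_alt y z x x := by
  simp [solution, solution_alt, PySem.Set.ofList, PySem.Set.add, PySem.Set.empty, PySem.Dict.insert,
      PySem.Dict.empty, PySem.Dict.getD, PySem.Dict.get?, PySem.Dict.contains,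
      PySem.Dict.values, PySem.Dict.keys, PySem.List.sorted, PySem.List.insertBy,
      List.foldl, h0, h1, h2, Ne.symm]

lemma Ldist (a b c d : Int) (h0 : a ≠ b) (h1 : a ≠ c) (h2 : a ≠ d) (h3 : b ≠ c) (h4 : b ≠ d) (h5 : c ≠ d) :
    solution a b c d = solution_alt a b c d := by
  simp [solution, solution_alt, PySem.Set.ofList, PySem.Set.add, PySem.Set.empty, PySem.Dict.insert,
      PySem.Dict.empty, PySem.Dict.getD, PySem.Dict.get?, PySem.Dict.contains,
      PySem.Dict.values, PySem.List.sorted, PySem.List.insertBy,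
      List.foldl, h0, h1, h2, h3, h4, h5, Ne.symm, min_def]
  split_ifs <;> omega

-- ===== VERDICT (by name: the statement is the Claim_ definition above) =====

lemma Gall (a b c d : Int) (hab : a = b) (hac : a = c) (had : a = d) :
    solution a b c d = solution_alt a b c d := by subst hab hac had; exact Lall _
lemma Gtrip1 (a b c d : Int) (hab : a = b) (hbc : b = c) (had : ¬ a = d) :
    solution a b c d = solution_alt a b c d := by subst hab; subst hbc; exact Ltrip1 _ _ had
lemma Gtrip2 (a b c d : Int) (hab : a = b) (hbd : b = d) (hac : ¬ a = c) :
    solution a b c d = solution_alt a b c d := by subst hab; subst hbd; exact Ltrip2 _ _ hac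
lemma Gtrip3 (a b c d : Int) (hac : a = c) (hcd : c = d) (hab : ¬ a = b) :
    solution a b c d = solution_alt a b c d := by subst hac; subst hcd; exact Ltrip3 _ _ hab
lemma Gtrip4 (a b c d : Int) (hbc : b = c) (hcd : c = d) (hab : ¬ a = b) :
    solution a b c d = solution_alt a b c d := by subst hbc; subst hcd; exact Ltrip4 _ _ (by omega)
lemma Gpp1 (a b c d : Int) (hab : a = b) (hcd : c = d) (hac : ¬ a = c) :
    solution a b c d = solution_alt a b c d := by subst hab hcd; exact Lpp1 _ _ hac
lemma Gpp2 (a b c d : Int) (hac : a = c) (hbd : b = d) (hab : ¬ a = b) :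
    solution a b c d = solution_alt a b c d := by subst hac hbd; exact Lpp2 _ _ hab
lemma Gpp3 (a b c d : Int) (had : a = d) (hbc : b = c) (hab : ¬ a = b) :
    solution a b c d = solution_alt a b c d := by subst had hbc; exact Lpp3 _ _ hab
lemma Gp12 (a b c d : Int) (hab : a = b) (hac : ¬ a = c) (had : ¬ a = d) (hcd : ¬ c = d) :
    solution a b c d = solution_alt a b c d := by subst hab; exact Lp12 _ _ _ hac had hcd
lemma Gp13 (a b c d : Int) (hac : a = c) (hab : ¬ a = b) (had : ¬ a = d) (hbd : ¬ b = d) :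
    solution a b c d = solution_alt a b c d := by subst hac; exact Lp13 _ _ _ (by omega) had hbd
lemma Gp14 (a b c d : Int) (had : a = d) (hab : ¬ a = b) (hac : ¬ a = c) (hbc : ¬ b = c) :
    solution a b c d = solution_alt a b c d := by subst had; exact Lp14 _ _ _ (by omega) (by omega) hbc
lemma Gp23 (a b c d : Int) (hbc : b = c) (hab : ¬ a = b) (hbd : ¬ b = d) (had : ¬ a = d) :
    solution a b c d = solution_alt a b c d := by subst hbc; exact Lp23 _ _ _ (by omega) hbd had
lemma Gp24 (a b c d : Int) (hbd : b = d) (hab : ¬ a = b) (hbc : ¬ b = c) (hac : ¬ a = c) :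
    solution a b c d = solution_alt a b c d := by subst hbd; exact Lp24 _ _ _ (by omega) hbc hac
lemma Gp34 (a b c d : Int) (hcd : c = d) (hac : ¬ a = c) (hbc : ¬ b = c) (hab : ¬ a = b) :
    solution a b c d = solution_alt a b c d := by subst hcd; exact Lp34 _ _ _ (by omega) (by omega) hab

theorem solution_spec : Claim_equal_solution := by
  intro a b c d _
  unfold Spec_solution
  by_cases hab : a = b
  · by_cases hac : a = c
    · by_cases had : a = d
      · by_cases hbc : b = c
        · by_cases hbd : b = d
          · by_cases hcd : c = d
            · exact Gall a b c d hab hac had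
            · exact absurd (by omega) hcd
          · by_cases hcd : c = d
            · exact absurd (by omega) hbd
            · exact absurd (by omega) hbd
        · by_cases hbd : b = d
          · by_cases hcd : c = d
            · exact absurd (by omega) hbc
            · exact absurd (by omega) hbc
          · by_cases hcd : c = d
            · exact absurd (by omega) hbc
            · exact absurd (by omega) hbc
      · by_cases hbc : b = c
        · by_cases hbd : b = d
          · by_cases hcd : c = d
            · exact absurd (by omega) had
            · exact absurd (by omega) had
          · by_cases hcd : c = d
            · exact absurd (by omega) had
            · exact Gtrip1 a b c d hab hbc had
        · by_cases hbd : b = d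
          · by_cases hcd : c = d
            · exact absurd (by omega) had
            · exact absurd (by omega) had
          · by_cases hcd : c = d
            · exact absurd (by omega) had
            · exact absurd (by omega) hbc
    · by_cases had : a = d
      · by_cases hbc : b = c
        · by_cases hbd : b = d
          · by_cases hcd : c = d
            · exact absurd (by omega) hac
            · exact absurd (by omega) hac
          · by_cases hcd : c = d
            · exact absurd (by omega) hac
            · exact absurd (by omega) hac
        · by_cases hbd : b = d
          · by_cases hcd : c = d
            · exact absurd (by omega) hac
            · exact Gtrip2 a b c d hab hbd hac
          · by_cases hcd : c = d
            · exact absurd (by omega) hac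
            · exact absurd (by omega) hbd
      · by_cases hbc : b = c
        · by_cases hbd : b = d
          · by_cases hcd : c = d
            · exact absurd (by omega) hac
            · exact absurd (by omega) hac
          · by_cases hcd : c = d
            · exact absurd (by omega) hac
            · exact absurd (by omega) hac
        · by_cases hbd : b = d
          · by_cases hcd : c = d
            · exact absurd (by omega) hac
            · exact absurd (by omega) had
          · by_cases hcd : c = d
            · exact Gpp1 a b c d hab hcd hac
            · exact Gp12 a b c d hab hac had hcd
  · by_cases hac : a = c
    · by_cases had : a = d
      · by_cases hbc : b = c
        · by_cases hbd : b = d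
          · by_cases hcd : c = d
            · exact absurd (by omega) hab
            · exact absurd (by omega) hab
          · by_cases hcd : c = d
            · exact absurd (by omega) hab
            · exact absurd (by omega) hab
        · by_cases hbd : b = d
          · by_cases hcd : c = d
            · exact absurd (by omega) hab
            · exact absurd (by omega) hab
          · by_cases hcd : c = d
            · exact Gtrip3 a b c d hac hcd hab
            · exact absurd (by omega) hcd
      · by_cases hbc : b = c
        · by_cases hbd : b = d
          · by_cases hcd : c = d
            · exact absurd (by omega) hab
            · exact absurd (by omega) hab
          · by_cases hcd : c = d
            · exact absurd (by omega) hab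
            · exact absurd (by omega) hab
        · by_cases hbd : b = d
          · by_cases hcd : c = d
            · exact absurd (by omega) hab
            · exact Gpp2 a b c d hac hbd hab
          · by_cases hcd : c = d
            · exact absurd (by omega) had
            · exact Gp13 a b c d hac hab had hbd
    · by_cases had : a = d
      · by_cases hbc : b = c
        · by_cases hbd : b = d
          · by_cases hcd : c = d
            · exact absurd (by omega) hab
            · exact absurd (by omega) hab
          · by_cases hcd : c = d
            · exact absurd (by omega) hab
            · exact Gpp3 a b c d had hbc hab
        · by_cases hbd : b = d
          · by_cases hcd : c = d
            · exact absurd (by omega) hab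
            · exact absurd (by omega) hab
          · by_cases hcd : c = d
            · exact absurd (by omega) hac
            · exact Gp14 a b c d had hab hac hbc
      · by_cases hbc : b = c
        · by_cases hbd : b = d
          · by_cases hcd : c = d
            · exact Gtrip4 a b c d hbc hcd hab
            · exact absurd (by omega) hcd
          · by_cases hcd : c = d
            · exact absurd (by omega) hbd
            · exact Gp23 a b c d hbc hab hbd had
        · by_cases hbd : b = d
          · by_cases hcd : c = d
            · exact absurd (by omega) hbc
            · exact Gp24 a b c d hbd hab hbc hac
          · by_cases hcd : c = d
            · exact Gp34 a b c d hcd hac hbc hab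
            · exact Ldist a b c d hab hac had hbc hbd hcd
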